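-- pv_equiv track=rewrite | github.com/DanielMevs/Data-Structures-and-Algorithms-Practice | two_pointers/easy/apply_operations_to_an_array/solution1.py | applyOperations
-- ===== SOURCE A (Python) =====
-- from typing import List
--
-- def applyOperations(nums: List[int]) -> List[int]:
--     for i in range(len(nums) - 1):
--         if nums[i] == nums[i + 1]:
--             nums[i] *= 2
--             nums[i + 1] = 0
--
--     left = 0
--     for i in range(len(nums)):
--         if nums[i]:
--             nums[left], nums[i] = nums[i], nums[left]
--             left += 1
--     return nums
-- ===== SOURCE B (Python) =====
-- from typing import List
--
-- def applyOperations(nums: List[int]) -> List[int]: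
--     # One streaming pass with a carried "current" value does the pair-doubling,
--     # then zeros are pushed right by filter-and-pad; mutates nums in place like A.
--     out = []
--     if nums:
--         cur = nums[0]
--         for x in nums[1:]:
--             if cur == x:
--                 out.append(2 * cur)
--                 cur = 0
--             else:
--                 out.append(cur)
--                 cur = x
--         out.append(cur)
--     nz = [v for v in out if v]
--     nums[:] = nz + [0] * (len(nums) - len(nz))
--     return nums
-- ===== Notes on version B (the rewrite author's own statement) =====
-- stated objective: simpler
-- what changed: Replaces A's two index-based in-place loops (random-access reads/writes and a two-pointer swap) by a single streaming pass carrying the current value for the pair-doubling, followed by filter-and-pad to push zeros right.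
import Mathlib
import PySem

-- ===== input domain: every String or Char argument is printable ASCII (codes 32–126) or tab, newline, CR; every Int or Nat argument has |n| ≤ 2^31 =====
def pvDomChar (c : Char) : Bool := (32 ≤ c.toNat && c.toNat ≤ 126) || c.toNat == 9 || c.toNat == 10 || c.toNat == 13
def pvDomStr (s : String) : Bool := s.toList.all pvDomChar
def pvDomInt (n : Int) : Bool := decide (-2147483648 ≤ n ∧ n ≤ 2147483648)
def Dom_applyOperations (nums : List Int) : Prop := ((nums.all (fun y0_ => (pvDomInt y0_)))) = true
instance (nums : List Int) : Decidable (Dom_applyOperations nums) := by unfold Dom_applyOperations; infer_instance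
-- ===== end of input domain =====

-- B replaces A's in-place index loops by a streaming pair-doubling pass with a carried value
-- plus filter-and-pad for the zero shift (objective: simpler; equivalence is about the return
-- value — A mutates its argument in place, B's Python mutates it the same way via nums[:] = ...).

-- ===== PORT A =====
-- for i in range(len(nums)-1): if nums[i] == nums[i+1]: nums[i] *= 2; nums[i+1] = 0
def aStep1 (xs : List Int) (i : Int) : List Int :=
  if PySem.List.pyGetD xs i 0 = PySem.List.pyGetD xs (i + 1) 0 then
    PySem.List.pySetD (PySem.List.pySetD xs i (2 * PySem.List.pyGetD xs i 0)) (i + 1) 0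
  else xs

-- for i in range(len(nums)): if nums[i]: nums[left], nums[i] = nums[i], nums[left]; left += 1
def aStep2 (p : List Int × Int) (i : Int) : List Int × Int :=
  if PySem.List.pyGetD p.1 i 0 ≠ 0 then
    (PySem.List.pySetD (PySem.List.pySetD p.1 p.2 (PySem.List.pyGetD p.1 i 0)) i
        (PySem.List.pyGetD p.1 p.2 0), p.2 + 1)
  else p

def applyOperations (nums : List Int) : List Int :=
  let xs1 := (PySem.List.pyRange 0 ((nums.length : Int) - 1) 1).foldl aStep1 nums
  ((PySem.List.pyRange 0 (xs1.length : Int) 1).foldl aStep2 (xs1, 0)).1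

-- ===== PORT B =====
-- the streaming pass: cur is the carried current value, the loop body appends one element per x
def altGo (cur : Int) : List Int → List Int
  | [] => [cur]
  | x :: t => if cur = x then 2 * cur :: altGo 0 t else cur :: altGo x t

def applyOperations_alt (nums : List Int) : List Int :=
  let out : List Int := match nums with | [] => [] | c :: t => altGo c t
  let nz := out.filter (fun v => v ≠ 0)
  nz ++ List.replicate (nums.length - nz.length) 0

-- ===== PRECONDITION & SPEC =====
def Spec_applyOperations (nums : List Int) (out : List Int) : Prop := out = applyOperations_alt nums
instance (nums : List Int) (out : List Int) : Decidable (Spec_applyOperations nums out) := by unfold Spec_applyOperations; infer_instance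

-- ===== CLAIM (what is proved, stated in full; the proofs are below) =====
def Claim_equal_applyOperations : Prop := ∀ (nums : List Int), Dom_applyOperations nums → Spec_applyOperations nums (applyOperations nums)

-- ===== LEMMAS AND PROOFS =====

lemma getD_at_len (p t : List Int) (c : Int) : (p ++ c :: t).getD p.length 0 = c := by
  induction p with
  | nil => rfl
  | cons a p ih => simpa using ih

lemma getD_at_len1 (p t : List Int) (c x : Int) :
    (p ++ c :: x :: t).getD (p.length + 1) 0 = x := by
  have h := getD_at_len (p ++ [c]) t x
  simpa using h

lemma set_at_len (p t : List Int) (c v : Int) : (p ++ c :: t).set p.length v = p ++ v :: t := by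
  induction p with
  | nil => rfl
  | cons a p ih => simpa using ih

lemma length_altGo (cur : Int) (t : List Int) : (altGo cur t).length = t.length + 1 := by
  induction t generalizing cur with
  | nil => rfl
  | cons x t ih => by_cases h : cur = x <;> simp [altGo, h, ih]

-- first loop: processing indices [p.length, p.length + t.length) of p ++ cur :: t is altGo
lemma pass1_loop (t : List Int) : ∀ (p : List Int) (cur : Int),
    (PySem.List.pyRange (p.length : Int) ((p.length + t.length : Nat) : Int) 1).foldl aStep1
        (p ++ cur :: t) = p ++ altGo cur t := by
  induction t with
  | nil =>
    intro p cur
    rw [PySem.List.pyRange_one_eq_nil (by simp)]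
    rfl
  | cons x t ih =>
    intro p cur
    rw [PySem.List.pyRange_one_cons (by push_cast [List.length_cons]; omega)]
    have h1 : ((p.length : Int) + 1) = ((p.length + 1 : Nat) : Int) := by push_cast; ring
    have hget : PySem.List.pyGetD (p ++ cur :: x :: t) (p.length : Int) 0 = cur := by
      rw [PySem.List.pyGetD_natCast]
      exact getD_at_len p (x :: t) cur
    have hget1 : PySem.List.pyGetD (p ++ cur :: x :: t) ((p.length : Int) + 1) 0 = x := by
      rw [h1, PySem.List.pyGetD_natCast]
      exact getD_at_len1 p t cur x
    have hrange : ∀ w : Int,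
        PySem.List.pyRange ((p.length : Int) + 1) ((p.length + (x :: t).length : Nat) : Int) 1
          = PySem.List.pyRange (((p ++ [w]).length : Nat) : Int)
              (((p ++ [w]).length + t.length : Nat) : Int) 1 := by
      intro w
      have e1 : ((p.length : Int) + 1) = (((p ++ [w]).length : Nat) : Int) := by
        simp
      have e2 : ((p.length + (x :: t).length : Nat) : Int)
          = (((p ++ [w]).length + t.length : Nat) : Int) := by
        simp only [List.length_append, List.length_cons, List.length_nil]
        push_cast; ring
      rw [e1, e2]
    by_cases h : cur = x
    · subst h
      have hstep : aStep1 (p ++ cur :: cur :: t) (p.length : Int)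
          = p ++ (2 * cur) :: 0 :: t := by
        unfold aStep1
        rw [hget, hget1, if_pos rfl, h1]
        simp only [PySem.List.pySetD_natCast]
        rw [set_at_len p (cur :: t) cur (2 * cur)]
        rw [show p ++ 2 * cur :: cur :: t = (p ++ [2 * cur]) ++ cur :: t by simp]
        rw [show p.length + 1 = (p ++ [2 * cur]).length by simp]
        rw [set_at_len (p ++ [2 * cur]) t cur 0]
        simp
      rw [List.foldl_cons, hstep, hrange (2 * cur)]
      have hih := ih (p ++ [2 * cur]) 0
      rw [show (p ++ [2 * cur]) ++ 0 :: t = p ++ 2 * cur :: 0 :: t by simp] at hih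
      rw [hih]
      simp [altGo]
    · have hstep : aStep1 (p ++ cur :: x :: t) (p.length : Int) = p ++ cur :: x :: t := by
        unfold aStep1
        rw [hget, hget1, if_neg h]
      rw [List.foldl_cons, hstep, hrange cur]
      have hih := ih (p ++ [cur]) x
      rw [show (p ++ [cur]) ++ x :: t = p ++ cur :: x :: t by simp] at hih
      rw [hih]
      simp [altGo, h]

-- second loop: invariant state nz ++ replicate z 0 ++ r with left = nz.length
lemma pass2_loop (r : List Int) : ∀ (nz : List Int) (z : Nat),
    (PySem.List.pyRange ((nz.length + z : Nat) : Int) ((nz.length + z + r.length : Nat) : Int) 1).foldl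
        aStep2 (nz ++ List.replicate z 0 ++ r, (nz.length : Int))
      = (nz ++ r.filter (fun v => v ≠ 0) ++
          List.replicate (z + (r.length - (r.filter (fun v => v ≠ 0)).length)) 0,
         ((nz.length + (r.filter (fun v => v ≠ 0)).length : Nat) : Int)) := by
  induction r with
  | nil =>
    intro nz z
    rw [PySem.List.pyRange_one_eq_nil (by simp)]
    simp
  | cons v r ih =>
    intro nz z
    rw [PySem.List.pyRange_one_cons (by push_cast [List.length_cons]; omega)]
    have hflen := List.length_filter_le (fun v : Int => decide (v ≠ 0)) r
    have hgeti : PySem.List.pyGetD (nz ++ List.replicate z 0 ++ v :: r)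
        ((nz.length + z : Nat) : Int) 0 = v := by
      rw [PySem.List.pyGetD_natCast,
        show nz ++ List.replicate z 0 ++ v :: r = (nz ++ List.replicate z 0) ++ v :: r by simp,
        show nz.length + z = (nz ++ List.replicate z 0).length by simp]
      exact getD_at_len _ r v
    by_cases h : v = 0
    · -- zero: state unchanged, the zero joins the middle block
      have hstep : aStep2 (nz ++ List.replicate z 0 ++ v :: r, (nz.length : Int))
          ((nz.length + z : Nat) : Int) = (nz ++ List.replicate z 0 ++ v :: r, (nz.length : Int)) := by
        unfold aStep2
        rw [hgeti, if_neg (by simp [h])]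
      rw [List.foldl_cons, hstep]
      have hre : nz ++ List.replicate z 0 ++ v :: r
          = nz ++ List.replicate (z + 1) 0 ++ r := by
        rw [h, List.replicate_succ']
        simp
      have hrange :
          PySem.List.pyRange (((nz.length + z : Nat) : Int) + 1)
              ((nz.length + z + (v :: r).length : Nat) : Int) 1
            = PySem.List.pyRange ((nz.length + (z + 1) : Nat) : Int)
                ((nz.length + (z + 1) + r.length : Nat) : Int) 1 := by
        have e1 : (((nz.length + z : Nat) : Int) + 1) = ((nz.length + (z + 1) : Nat) : Int) := by
          push_cast; ring
        have e2 : ((nz.length + z + (v :: r).length : Nat) : Int)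
            = ((nz.length + (z + 1) + r.length : Nat) : Int) := by
          simp only [List.length_cons]; push_cast; ring
        rw [e1, e2]
      have hfc : List.filter (fun x => decide (x ≠ 0)) (v :: r)
          = List.filter (fun x => decide (x ≠ 0)) r := by simp [h]
      rw [hre, hrange, ih nz (z + 1), hfc]
      have hn : z + 1 + (r.length - (List.filter (fun x => decide (x ≠ 0)) r).length)
          = z + ((v :: r).length - (List.filter (fun x => decide (x ≠ 0)) r).length) := by
        simp only [List.length_cons]; omega
      rw [hn]
    · -- nonzero: swap with position nz.length
      have hgetl : PySem.List.pyGetD (nz ++ List.replicate z 0 ++ v :: r) (nz.length : Int) 0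
          = if z = 0 then v else 0 := by
        rw [PySem.List.pyGetD_natCast]
        cases z with
        | zero => simpa using getD_at_len nz r v
        | succ z' =>
          rw [show nz ++ List.replicate (z' + 1) 0 ++ v :: r
              = nz ++ (0 : Int) :: (List.replicate z' 0 ++ v :: r) by simp [List.replicate_succ]]
          rw [getD_at_len nz (List.replicate z' 0 ++ v :: r) 0]
          simp
      have hstep : aStep2 (nz ++ List.replicate z 0 ++ v :: r, (nz.length : Int))
          ((nz.length + z : Nat) : Int)
          = ((nz ++ [v]) ++ List.replicate z 0 ++ r, (nz.length : Int) + 1) := by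
        unfold aStep2
        simp only [hgeti, hgetl]
        rw [if_pos h]
        simp only [PySem.List.pySetD_natCast]
        cases z with
        | zero =>
          rw [show nz ++ List.replicate 0 (0 : Int) ++ v :: r = nz ++ v :: r by simp]
          rw [set_at_len nz r v v]
          rw [show nz.length + 0 = nz.length from rfl]
          rw [set_at_len nz r v (if (0 : Nat) = 0 then v else 0)]
          simp
        | succ z' =>
          rw [show nz ++ List.replicate (z' + 1) 0 ++ v :: r
              = nz ++ (0 : Int) :: (List.replicate z' 0 ++ v :: r) by simp [List.replicate_succ]]
          rw [set_at_len nz (List.replicate z' 0 ++ v :: r) 0 v]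
          rw [show nz ++ v :: (List.replicate z' 0 ++ v :: r)
              = (nz ++ v :: List.replicate z' 0) ++ v :: r by simp]
          rw [show nz.length + (z' + 1) = (nz ++ v :: List.replicate z' 0).length by simp]
          rw [set_at_len (nz ++ v :: List.replicate z' 0) r v (if z' + 1 = 0 then v else 0)]
          rw [if_neg (by omega)]
          rw [show (nz ++ v :: List.replicate z' 0) ++ (0 : Int) :: r
              = (nz ++ [v]) ++ (List.replicate z' 0 ++ [0]) ++ r by simp]
          rw [← List.replicate_succ']
      rw [List.foldl_cons, hstep]
      have hrange2 :
          PySem.List.pyRange (((nz.length + z : Nat) : Int) + 1)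
              ((nz.length + z + (v :: r).length : Nat) : Int) 1
            = PySem.List.pyRange (((nz ++ [v]).length + z : Nat) : Int)
                (((nz ++ [v]).length + z + r.length : Nat) : Int) 1 := by
        have e1 : (((nz.length + z : Nat) : Int) + 1) = (((nz ++ [v]).length + z : Nat) : Int) := by
          simp only [List.length_append, List.length_cons, List.length_nil]
          push_cast; ring
        have e2 : ((nz.length + z + (v :: r).length : Nat) : Int)
            = (((nz ++ [v]).length + z + r.length : Nat) : Int) := by
          simp only [List.length_append, List.length_cons, List.length_nil]
          push_cast; ring
        rw [e1, e2]
      have hleft : (nz.length : Int) + 1 = (((nz ++ [v]).length : Nat) : Int) := by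
        simp
      have hfc : List.filter (fun x => decide (x ≠ 0)) (v :: r)
          = v :: List.filter (fun x => decide (x ≠ 0)) r := by simp [h]
      rw [hrange2, hleft, ih (nz ++ [v]) z, hfc]
      simp only [Prod.mk.injEq]
      constructor
      · have hn : z + (r.length - (List.filter (fun x => decide (x ≠ 0)) r).length)
            = z + ((v :: r).length - (v :: List.filter (fun x => decide (x ≠ 0)) r).length) := by
          simp only [List.length_cons]; omega
        rw [hn]
        simp
      · simp only [List.length_append, List.length_cons, List.length_nil]
        push_cast; ring

-- ===== VERDICT (by name: the statement is the Claim_ definition above) =====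
theorem applyOperations_spec : Claim_equal_applyOperations := by
  intro nums _
  show applyOperations nums = applyOperations_alt nums
  cases nums with
  | nil => rfl
  | cons c t =>
    have h1 : applyOperations (c :: t)
        = ((PySem.List.pyRange 0 (((altGo c t).length : Nat) : Int) 1).foldl aStep2
            (altGo c t, 0)).1 := by
      unfold applyOperations
      have hp := pass1_loop t [] c
      simp only [List.nil_append, List.length_nil, Nat.cast_zero, Nat.zero_add] at hp
      have hb : (((c :: t).length : Int) - 1) = ((t.length : Nat) : Int) := by
        simp
      rw [hb, hp]
    rw [h1]
    have h2 := pass2_loop (altGo c t) [] 0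
    simp only [List.length_nil, Nat.zero_add, Nat.add_zero, List.replicate_zero,
      List.nil_append, Nat.cast_zero] at h2
    rw [h2]
    unfold applyOperations_alt
    simp [length_altGo]
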